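-- pv_equiv track=rewrite | github.com/SatoshiReport/aws-s3-migration | cost_toolkit/scripts/cleanup/aws_cleanup_unused_resources.py | _group_resources_by_region
-- ===== SOURCE A (Python) =====
-- def _group_resources_by_region(all_unused_sgs, all_unused_subnets):
--     """Group unused resources by region."""
--     regions_with_unused = {}
--
--     for region, sg in all_unused_sgs:
--         if region not in regions_with_unused:
--             regions_with_unused[region] = {"sgs": [], "subnets": []}
--         regions_with_unused[region]["sgs"].append(sg)
--
--     for region, subnet in all_unused_subnets:
--         if region not in regions_with_unused:
--             regions_with_unused[region] = {"sgs": [], "subnets": []}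
--         regions_with_unused[region]["subnets"].append(subnet)
--
--     return regions_with_unused
-- ===== SOURCE B (Python) =====
-- def _group_resources_by_region(all_unused_sgs, all_unused_subnets):
--     """Group unused resources by region."""
--     sgs_by_region = {}
--     for region, sg in all_unused_sgs:
--         sgs_by_region.setdefault(region, []).append(sg)
--
--     subnets_by_region = {}
--     for region, subnet in all_unused_subnets:
--         subnets_by_region.setdefault(region, []).append(subnet)
--
--     regions = list(sgs_by_region) + [r for r in subnets_by_region if r not in sgs_by_region]
--
--     result = {}
--     for region in regions:
--         result[region] = {
--             "sgs": sgs_by_region.get(region, []),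
--             "subnets": subnets_by_region.get(region, []),
--         }
--     return result
-- ===== Notes on version B (the rewrite author's own statement) =====
-- stated objective: alternative
-- what changed: B replaces A's single incrementally-mutated nested dict (create the two-slot entry on first sight, append into the right slot) by two independent flat region->list indexes built in one pass each, plus a final assembly pass over the combined key order.
import Mathlib
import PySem

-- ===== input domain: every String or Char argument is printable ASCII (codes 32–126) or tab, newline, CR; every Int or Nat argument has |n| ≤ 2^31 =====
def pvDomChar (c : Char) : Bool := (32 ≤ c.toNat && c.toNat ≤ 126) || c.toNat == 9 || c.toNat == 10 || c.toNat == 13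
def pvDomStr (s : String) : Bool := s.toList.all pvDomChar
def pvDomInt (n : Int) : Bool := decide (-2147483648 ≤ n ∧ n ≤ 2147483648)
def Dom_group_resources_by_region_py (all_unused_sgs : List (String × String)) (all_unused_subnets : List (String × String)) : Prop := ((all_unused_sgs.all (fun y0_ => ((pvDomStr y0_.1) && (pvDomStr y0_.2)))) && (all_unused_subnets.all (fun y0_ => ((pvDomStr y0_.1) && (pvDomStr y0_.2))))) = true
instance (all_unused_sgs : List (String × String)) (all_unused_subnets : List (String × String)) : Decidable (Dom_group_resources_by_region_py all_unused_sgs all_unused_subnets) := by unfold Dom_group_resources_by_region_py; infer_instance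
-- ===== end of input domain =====

-- B builds two independent flat region->list indexes and assembles the nested result in a
-- final pass, instead of A's incrementally-mutated nested dict; objective: alternative decomposition.

-- ===== PORT A =====
def group_resources_by_region_py (all_unused_sgs : List (String × String)) (all_unused_subnets : List (String × String)) : List (String × List (String × List String)) :=
  let d : PySem.Dict String (PySem.Dict String (List String)) :=
    all_unused_sgs.foldl (fun d p =>
      let d := if d.contains p.1 then d
               else d.insert p.1 (PySem.Dict.ofList [("sgs", ([] : List String)), ("subnets", [])])
      -- regions_with_unused[region]["sgs"].append(sg): key is present, so the default is never used
      d.modify p.1 (PySem.Dict.ofList []) (fun inner => inner.modify "sgs" [] (fun v => v ++ [p.2])))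
      PySem.Dict.empty
  let d :=
    all_unused_subnets.foldl (fun d p =>
      let d := if d.contains p.1 then d
               else d.insert p.1 (PySem.Dict.ofList [("sgs", ([] : List String)), ("subnets", [])])
      d.modify p.1 (PySem.Dict.ofList []) (fun inner => inner.modify "subnets" [] (fun v => v ++ [p.2])))
      d
  d.items.map (fun q => (q.1, q.2.items))

-- ===== PORT B =====
def group_resources_by_region_py_alt (all_unused_sgs : List (String × String)) (all_unused_subnets : List (String × String)) : List (String × List (String × List String)) :=
  let sgsBy : PySem.Dict String (List String) :=
    all_unused_sgs.foldl (fun d p => d.modify p.1 [] (fun v => v ++ [p.2])) PySem.Dict.empty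
  let subBy : PySem.Dict String (List String) :=
    all_unused_subnets.foldl (fun d p => d.modify p.1 [] (fun v => v ++ [p.2])) PySem.Dict.empty
  let regions := sgsBy.keys ++ subBy.keys.filter (fun r => !(sgsBy.contains r))
  let res : PySem.Dict String (PySem.Dict String (List String)) :=
    regions.foldl (fun res r =>
      res.insert r (PySem.Dict.ofList [("sgs", sgsBy.getD r []), ("subnets", subBy.getD r [])]))
      PySem.Dict.empty
  res.items.map (fun q => (q.1, q.2.items))

-- ===== PRECONDITION & SPEC =====
def Spec_group_resources_by_region_py (all_unused_sgs : List (String × String)) (all_unused_subnets : List (String × String)) (out : List (String × List (String × List String))) : Prop := out = group_resources_by_region_py_alt all_unused_sgs all_unused_subnets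
instance (all_unused_sgs : List (String × String)) (all_unused_subnets : List (String × String)) (out : List (String × List (String × List String))) : Decidable (Spec_group_resources_by_region_py all_unused_sgs all_unused_subnets out) := by unfold Spec_group_resources_by_region_py; infer_instance

-- ===== CLAIM (what is proved, stated in full; the proofs are below) =====
def Claim_equal_group_resources_by_region_py : Prop := ∀ (all_unused_sgs : List (String × String)) (all_unused_subnets : List (String × String)), Dom_group_resources_by_region_py all_unused_sgs all_unused_subnets → Spec_group_resources_by_region_py all_unused_sgs all_unused_subnets (group_resources_by_region_py all_unused_sgs all_unused_subnets)

-- ===== LEMMAS AND PROOFS =====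

-- the values grouped under region r from list l
def pvFilt (l : List (String × String)) (r : String) : List String :=
  (l.filter (fun p => p.1 == r)).map (·.2)

def pvEntry (sgsL subL : List String) : PySem.Dict String (List String) :=
  PySem.Dict.mk [("sgs", sgsL), ("subnets", subL)]

theorem pvFilt_append (l : List (String × String)) (p : String × String) (r : String) :
    pvFilt (l ++ [p]) r = pvFilt l r ++ (if p.1 = r then [p.2] else []) := by
  by_cases h : p.1 = r
  · simp [pvFilt, List.filter_append, List.filter, h]
  · simp [pvFilt, List.filter_append, List.filter, h]
    simp [show (p.1 == r) = false from by simpa using h]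

theorem pvFilt_of_not_mem (l : List (String × String)) (r : String)
    (h : r ∉ l.map (·.1)) : pvFilt l r = [] := by
  refine List.map_eq_nil_iff.mpr (List.filter_eq_nil_iff.mpr ?_)
  intro p hp hpr
  exact h (List.mem_map.mpr ⟨p, hp, by simpa using hpr⟩)

theorem pvEntry_mod_sgs (a b l2 : List String) :
    (pvEntry a b).insert "sgs" ((pvEntry a b).getD "sgs" [] ++ l2) = pvEntry (a ++ l2) b := by
  simp [pvEntry, PySem.Dict.insert, PySem.Dict.getD, PySem.Dict.get?,
    PySem.Dict.contains]

theorem pvEntry_mod_sub (a b l2 : List String) :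
    (pvEntry a b).insert "subnets" ((pvEntry a b).getD "subnets" [] ++ l2) = pvEntry a (b ++ l2) := by
  simp [pvEntry, PySem.Dict.insert, PySem.Dict.getD, PySem.Dict.get?,
    PySem.Dict.contains]

theorem pvOfList_entry (a b : List String) :
    PySem.Dict.ofList [("sgs", a), ("subnets", b)] = pvEntry a b := by
  simp [pvEntry, PySem.Dict.ofList, PySem.Dict.update, PySem.Dict.insert, PySem.Dict.empty,
    PySem.Dict.contains]

theorem pv_keys_map_entry (T : List String) (g : String → PySem.Dict String (List String)) :
    (PySem.Dict.mk (T.map (fun r => (r, g r)))).keys = T := by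
  simp [PySem.Dict.keys, Function.comp_def]

-- one step of A's loop, for the "sgs" slot
theorem pvStep_sgs (T : List String) (hnd : T.Nodup) (A B : String → List String)
    (p : String × String) :
    ((fun (d : PySem.Dict String (PySem.Dict String (List String))) (p : String × String) =>
      let d := if d.contains p.1 then d
               else d.insert p.1 (PySem.Dict.ofList [("sgs", ([] : List String)), ("subnets", [])])
      d.modify p.1 (PySem.Dict.ofList []) (fun inner => inner.modify "sgs" [] (fun v => v ++ [p.2])))
      (PySem.Dict.mk (T.map (fun r => (r, pvEntry (A r) (B r))))) p).items
    = (PySem.Set.add T p.1).map (fun r =>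
        (r, pvEntry (if r = p.1 then (if p.1 ∈ T then A p.1 else []) ++ [p.2] else A r)
                    (if r = p.1 then (if p.1 ∈ T then B p.1 else []) else B r))) := by
  have hkeys := pv_keys_map_entry T (fun r => pvEntry (A r) (B r))
  have hcont : (PySem.Dict.mk (T.map (fun r => (r, pvEntry (A r) (B r))))).contains p.1
      = decide (p.1 ∈ T) := by
    rw [PySem.Dict.contains_eq_decide_mem_keys, hkeys]
  by_cases hp : p.1 ∈ T
  · -- existing region: the conditional insert is skipped, the entry is updated in place
    have hmem : (p.1, pvEntry (A p.1) (B p.1))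
        ∈ (PySem.Dict.mk (T.map (fun r => (r, pvEntry (A r) (B r))))).items :=
      List.mem_map.mpr ⟨p.1, hp, rfl⟩
    have hgetD := PySem.Dict.getD_of_mem_items _ hmem (by rw [hkeys]; exact hnd)
      (PySem.Dict.ofList [])
    simp only [hcont, hp, decide_true, if_true, PySem.Dict.modify, hgetD, pvEntry_mod_sgs]
    rw [PySem.Dict.items_insert_of_contains _ _ (by rw [hcont]; simp [hp]),
      PySem.Set.add_of_mem hp]
    simp only [List.map_map]
    refine List.map_congr_left (fun r hr => ?_)
    by_cases hrp : r = p.1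
    · simp [Function.comp, hrp]
    · simp [Function.comp, show (r == p.1) = false from by simpa using hrp, hrp]
  · -- fresh region: a new two-slot entry is created, then its "sgs" slot filled
    have hcont' : (PySem.Dict.mk (T.map (fun r => (r, pvEntry (A r) (B r))))).contains p.1 = false := by
      rw [hcont]; simpa using hp
    simp only [hcont', Bool.false_eq_true, if_false, PySem.Dict.modify,
      PySem.Dict.getD_insert_self, pvOfList_entry, pvEntry_mod_sgs]
    rw [PySem.Dict.items_insert_of_contains _ _ (PySem.Dict.contains_insert_self _ _ _),
      PySem.Dict.items_insert_of_not_contains _ _ hcont',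
      PySem.Set.add_of_not_mem hp]
    simp only [List.map_append, List.map_map]
    congr 1
    · refine List.map_congr_left (fun r hr => ?_)
      have hrp : r ≠ p.1 := fun h => hp (h ▸ hr)
      simp [Function.comp, show (r == p.1) = false from by simpa using hrp, hrp]
    · simp [hp]

-- one step of A's loop, for the "subnets" slot
theorem pvStep_sub (T : List String) (hnd : T.Nodup) (A B : String → List String)
    (p : String × String) :
    ((fun (d : PySem.Dict String (PySem.Dict String (List String))) (p : String × String) =>
      let d := if d.contains p.1 then d
               else d.insert p.1 (PySem.Dict.ofList [("sgs", ([] : List String)), ("subnets", [])])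
      d.modify p.1 (PySem.Dict.ofList []) (fun inner => inner.modify "subnets" [] (fun v => v ++ [p.2])))
      (PySem.Dict.mk (T.map (fun r => (r, pvEntry (A r) (B r))))) p).items
    = (PySem.Set.add T p.1).map (fun r =>
        (r, pvEntry (if r = p.1 then (if p.1 ∈ T then A p.1 else []) else A r)
                    (if r = p.1 then (if p.1 ∈ T then B p.1 else []) ++ [p.2] else B r))) := by
  have hkeys := pv_keys_map_entry T (fun r => pvEntry (A r) (B r))
  have hcont : (PySem.Dict.mk (T.map (fun r => (r, pvEntry (A r) (B r))))).contains p.1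
      = decide (p.1 ∈ T) := by
    rw [PySem.Dict.contains_eq_decide_mem_keys, hkeys]
  by_cases hp : p.1 ∈ T
  · have hmem : (p.1, pvEntry (A p.1) (B p.1))
        ∈ (PySem.Dict.mk (T.map (fun r => (r, pvEntry (A r) (B r))))).items :=
      List.mem_map.mpr ⟨p.1, hp, rfl⟩
    have hgetD := PySem.Dict.getD_of_mem_items _ hmem (by rw [hkeys]; exact hnd)
      (PySem.Dict.ofList [])
    simp only [hcont, hp, decide_true, if_true, PySem.Dict.modify, hgetD, pvEntry_mod_sub]
    rw [PySem.Dict.items_insert_of_contains _ _ (by rw [hcont]; simp [hp]),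
      PySem.Set.add_of_mem hp]
    simp only [List.map_map]
    refine List.map_congr_left (fun r hr => ?_)
    by_cases hrp : r = p.1
    · simp [Function.comp, hrp]
    · simp [Function.comp, show (r == p.1) = false from by simpa using hrp, hrp]
  · have hcont' : (PySem.Dict.mk (T.map (fun r => (r, pvEntry (A r) (B r))))).contains p.1 = false := by
      rw [hcont]; simpa using hp
    simp only [hcont', Bool.false_eq_true, if_false, PySem.Dict.modify,
      PySem.Dict.getD_insert_self, pvOfList_entry, pvEntry_mod_sub]
    rw [PySem.Dict.items_insert_of_contains _ _ (PySem.Dict.contains_insert_self _ _ _),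
      PySem.Dict.items_insert_of_not_contains _ _ hcont',
      PySem.Set.add_of_not_mem hp]
    simp only [List.map_append, List.map_map]
    congr 1
    · refine List.map_congr_left (fun r hr => ?_)
      have hrp : r ≠ p.1 := fun h => hp (h ▸ hr)
      simp [Function.comp, show (r == p.1) = false from by simpa using hrp, hrp]
    · simp [hp]

-- invariant of A's first loop
theorem loopA_sgs (l : List (String × String)) :
    (l.foldl (fun d p =>
      let d := if d.contains p.1 then d
               else d.insert p.1 (PySem.Dict.ofList [("sgs", ([] : List String)), ("subnets", [])])
      d.modify p.1 (PySem.Dict.ofList []) (fun inner => inner.modify "sgs" [] (fun v => v ++ [p.2])))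
      PySem.Dict.empty).items
    = (PySem.Set.ofList (l.map (·.1))).map (fun r => (r, pvEntry (pvFilt l r) [])) := by
  induction l using List.reverseRecOn with
  | nil => rfl
  | append_singleton l p ih =>
    rw [List.foldl_append, List.foldl_cons, List.foldl_nil]
    have hD : (l.foldl (fun d p =>
        let d := if d.contains p.1 then d
                 else d.insert p.1 (PySem.Dict.ofList [("sgs", ([] : List String)), ("subnets", [])])
        d.modify p.1 (PySem.Dict.ofList []) (fun inner => inner.modify "sgs" [] (fun v => v ++ [p.2])))
        PySem.Dict.empty)
        = PySem.Dict.mk ((PySem.Set.ofList (l.map (·.1))).map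
            (fun r => (r, pvEntry (pvFilt l r) []))) := PySem.Dict.ext ih
    rw [hD]
    refine (pvStep_sgs (PySem.Set.ofList (l.map (·.1))) (PySem.Set.nodup_ofList _)
      (fun r => pvFilt l r) (fun _ => []) p).trans ?_
    rw [show (l ++ [p]).map (·.1) = l.map (·.1) ++ [p.1] by simp,
      PySem.Set.ofList_append_singleton]
    refine List.map_congr_left (fun r hr => ?_)
    by_cases hrp : r = p.1
    · by_cases hp : p.1 ∈ PySem.Set.ofList (l.map (·.1))
      · simp [hrp, hp, pvFilt_append]
      · have hf : pvFilt l p.1 = [] :=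
          pvFilt_of_not_mem l p.1 (fun h => hp ((PySem.Set.mem_ofList _ _).mpr h))
        simp [hrp, hp, pvFilt_append, hf]
    · simp [hrp, pvFilt_append, show ¬ (p.1 = r) from fun h => hrp h.symm]

-- invariant of A's second loop, started from the first loop's assembled dict
theorem loopA_subs (sgs l : List (String × String)) :
    ((l.foldl (fun d p =>
      let d := if d.contains p.1 then d
               else d.insert p.1 (PySem.Dict.ofList [("sgs", ([] : List String)), ("subnets", [])])
      d.modify p.1 (PySem.Dict.ofList []) (fun inner => inner.modify "subnets" [] (fun v => v ++ [p.2])))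
      (PySem.Dict.mk ((PySem.Set.ofList (sgs.map (·.1))).map
        (fun r => (r, pvEntry (pvFilt sgs r) []))))).items)
    = (PySem.Set.update (PySem.Set.ofList (sgs.map (·.1))) (l.map (·.1))).map
        (fun r => (r, pvEntry (pvFilt sgs r) (pvFilt l r))) := by
  induction l using List.reverseRecOn with
  | nil => simp [PySem.Set.update, pvFilt]
  | append_singleton l p ih =>
    rw [List.foldl_append, List.foldl_cons, List.foldl_nil]
    have hD := PySem.Dict.ext (ν := PySem.Dict String (List String)) ih
    rw [hD]
    have hndT : (PySem.Set.update (PySem.Set.ofList (sgs.map (·.1))) (l.map (·.1))).Nodup :=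
      PySem.Set.nodup_update _ _ (PySem.Set.nodup_ofList _)
    refine (pvStep_sub _ hndT (fun r => pvFilt sgs r) (fun r => pvFilt l r) p).trans ?_
    rw [show (l ++ [p]).map (·.1) = l.map (·.1) ++ [p.1] by simp,
      PySem.Set.update_append]
    refine List.map_congr_left (fun r hr => ?_)
    by_cases hrp : r = p.1
    · by_cases hp : p.1 ∈ PySem.Set.update (PySem.Set.ofList (sgs.map (·.1))) (l.map (·.1))
      · simp [hrp, hp, pvFilt_append]
      · have hnsgs : p.1 ∉ sgs.map (·.1) := fun h =>
          hp ((PySem.Set.mem_update _ _ _).mpr (Or.inl ((PySem.Set.mem_ofList _ _).mpr h)))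
        have hnl : p.1 ∉ l.map (·.1) := fun h =>
          hp ((PySem.Set.mem_update _ _ _).mpr (Or.inr h))
        simp [hrp, hp, pvFilt_append, pvFilt_of_not_mem sgs p.1 hnsgs, pvFilt_of_not_mem l p.1 hnl]
    · simp [hrp, pvFilt_append, show ¬ (p.1 = r) from fun h => hrp h.symm]

-- B's flat index: lookups and keys
theorem pvFlat_getD (l : List (String × String)) (r : String) :
    (l.foldl (fun d p => d.modify p.1 [] (fun v => v ++ [p.2])) PySem.Dict.empty).getD r []
      = pvFilt l r := by
  rw [PySem.Dict.getD_foldl_modify_append]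
  simp [pvFilt, PySem.Dict.getD, PySem.Dict.get?, PySem.Dict.empty]

theorem pvFlat_keys (l : List (String × String)) :
    (l.foldl (fun d p => d.modify p.1 [] (fun v => v ++ [p.2])) PySem.Dict.empty).keys
      = PySem.Set.ofList (l.map (·.1)) := by
  rw [PySem.Dict.keys_foldl_modify_key l (·.1) []
    (fun _ p (v : List String) => v ++ [p.2]) PySem.Dict.empty]
  rw [show (PySem.Dict.empty : PySem.Dict String (List String)).keys = [] from rfl]
  rw [PySem.Set.update_nil_left]

-- ===== VERDICT (by name: the statement is the Claim_ definition above) =====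
theorem group_resources_by_region_py_spec : Claim_equal_group_resources_by_region_py := by
  intro sgs subs _
  show group_resources_by_region_py sgs subs = group_resources_by_region_py_alt sgs subs
  unfold group_resources_by_region_py group_resources_by_region_py_alt
  simp only []
  -- A's side
  have hA1 := PySem.Dict.ext (ν := PySem.Dict String (List String)) (loopA_sgs sgs)
  rw [hA1, loopA_subs sgs subs]
  -- B's side
  have hS1 : (sgs.foldl (fun d p => d.modify p.1 [] (fun v => v ++ [p.2])) PySem.Dict.empty).keys
      = PySem.Set.ofList (sgs.map (·.1)) := pvFlat_keys sgs
  have hS2 : (subs.foldl (fun d p => d.modify p.1 [] (fun v => v ++ [p.2])) PySem.Dict.empty).keys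
      = PySem.Set.ofList (subs.map (·.1)) := pvFlat_keys subs
  have hcont1 : ∀ r, (sgs.foldl (fun d p => d.modify p.1 [] (fun v => v ++ [p.2])) PySem.Dict.empty).contains r
      = PySem.Set.contains (PySem.Set.ofList (sgs.map (·.1))) r := by
    intro r
    rw [PySem.Dict.contains_eq_decide_mem_keys, hS1]
    simp [PySem.Set.contains]
  have hregions : (sgs.foldl (fun d p => d.modify p.1 [] (fun v => v ++ [p.2])) PySem.Dict.empty).keys
        ++ (subs.foldl (fun d p => d.modify p.1 [] (fun v => v ++ [p.2])) PySem.Dict.empty).keys.filter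
             (fun r => !((sgs.foldl (fun d p => d.modify p.1 [] (fun v => v ++ [p.2])) PySem.Dict.empty).contains r))
      = PySem.Set.update (PySem.Set.ofList (sgs.map (·.1))) (subs.map (·.1)) := by
    rw [hS1, hS2, PySem.Set.update_eq_append_filter]
    congr 1
    exact List.filter_congr (fun r _ => by rw [hcont1 r])
  rw [hregions]
  have hndU : (PySem.Set.update (PySem.Set.ofList (sgs.map (·.1))) (subs.map (·.1))).Nodup :=
    PySem.Set.nodup_update _ _ (PySem.Set.nodup_ofList _)
  rw [PySem.Dict.items_foldl_insert_fresh _ (fun r => r) _ PySem.Dict.empty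
    (fun a _ => rfl) (by simpa using hndU)]
  rw [show (PySem.Dict.empty : PySem.Dict String (PySem.Dict String (List String))).items = [] from rfl]
  simp only [List.nil_append, List.map_map]
  refine List.map_congr_left (fun r hr => ?_)
  simp only [Function.comp]
  rw [pvFlat_getD sgs r, pvFlat_getD subs r, pvOfList_entry]
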